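-- pv_equiv track=rewrite | github.com/AthharPro/zypher | python-scanner/zypher_scanner/scanner/rules/rule_insufficient_pbac.py | _find_stage_job_line
-- ===== SOURCE A (Python) =====
-- from typing import List, Dict, Any, Optional
--
-- def _find_stage_job_line(file_lines: List[str], stage_idx: int, job_idx: int) -> int:
--     """
--     Find the line number for a specific job in a stage.
--
--     Args:
--         file_lines: The file lines
--         stage_idx: Index of the stage
--         job_idx: Index of the job within the stage
--
--     Returns:
--         Line number if found, -1 otherwise
--     """
--     stage_marker_count = -1
--     job_marker_count = -1
--
--     # Find the right stage
--     for i, line in enumerate(file_lines):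
--         if "stage:" in line or "- stage:" in line:
--             stage_marker_count += 1
--             if stage_marker_count == stage_idx:
--                 # Found the right stage, now find the job
--                 for j in range(i, len(file_lines)):
--                     if "job:" in file_lines[j] or "- job:" in file_lines[j]:
--                         job_marker_count += 1
--                         if job_marker_count == job_idx:
--                             return j
--
--     return -1
-- ===== SOURCE B (Python) =====
-- def _find_stage_job_line(file_lines, stage_idx, job_idx):
--     """Index-table reimplementation: locate the stage via a prebuilt list of
--     stage-marker line numbers, then pick the job_idx-th job marker from there."""
--     stage_lines = [i for i, line in enumerate(file_lines) if "stage:" in line]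
--     if not (0 <= stage_idx < len(stage_lines) and 0 <= job_idx):
--         return -1
--     start = stage_lines[stage_idx]
--     jobs = [j for j in range(start, len(file_lines)) if "job:" in file_lines[j]]
--     return jobs[job_idx] if job_idx < len(jobs) else -1
-- ===== Notes on version B (the rewrite author's own statement) =====
-- stated objective: simpler
-- what changed: Replaces the nested counter loops (with their redundant '- stage:'/'- job:' substring tests and leaked job counter) by two flat comprehensions: an index table of stage-marker lines plus a list of job-marker lines from the chosen stage, indexed directly with explicit range guards.
import Mathlib
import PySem

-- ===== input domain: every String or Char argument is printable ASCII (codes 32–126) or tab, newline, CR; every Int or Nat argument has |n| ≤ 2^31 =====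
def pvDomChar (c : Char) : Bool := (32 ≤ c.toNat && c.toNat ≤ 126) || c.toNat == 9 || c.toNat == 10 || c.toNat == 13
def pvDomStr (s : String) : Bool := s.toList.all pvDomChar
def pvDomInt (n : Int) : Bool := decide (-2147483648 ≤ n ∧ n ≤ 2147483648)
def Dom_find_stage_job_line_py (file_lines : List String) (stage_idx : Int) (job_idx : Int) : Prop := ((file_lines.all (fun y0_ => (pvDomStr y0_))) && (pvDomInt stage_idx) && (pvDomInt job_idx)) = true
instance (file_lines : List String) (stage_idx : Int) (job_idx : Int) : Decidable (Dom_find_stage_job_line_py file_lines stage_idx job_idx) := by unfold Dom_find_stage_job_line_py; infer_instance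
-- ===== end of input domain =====

-- B replaces A's nested counter loops by an index table of stage-marker lines plus a
-- job-marker list scanned from the chosen stage (objective: simpler decomposition).

-- ===== PORT A =====
def pvStageHit (line : String) : Bool :=
  PySem.Str.isIn "stage:" line || PySem.Str.isIn "- stage:" line

def pvJobHit (line : String) : Bool :=
  PySem.Str.isIn "job:" line || PySem.Str.isIn "- job:" line

-- inner loop 'for j in range(i, len(file_lines))': returns (early return value, job_marker_count)
def pvAInner (file_lines : List String) (job_idx : Int) : List Int → Int → Option Int × Int
  | [], jmc => (none, jmc)
  | j :: rest, jmc =>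
    if pvJobHit (PySem.List.pyGetD file_lines j "") then
      if jmc + 1 = job_idx then (some j, jmc + 1)
      else pvAInner file_lines job_idx rest (jmc + 1)
    else pvAInner file_lines job_idx rest jmc

-- outer loop 'for i, line in enumerate(file_lines)' with stage_marker_count / job_marker_count
def pvAOuter (file_lines : List String) (stage_idx job_idx : Int) : List String → Int → Int → Int → Int
  | [], _, _, _ => -1
  | line :: rest, i, smc, jmc =>
    if pvStageHit line then
      if smc + 1 = stage_idx then
        match pvAInner file_lines job_idx (PySem.List.pyRange i (file_lines.length : Int) 1) jmc with
        | (some j, _) => j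
        | (none, jmc') => pvAOuter file_lines stage_idx job_idx rest (i + 1) (smc + 1) jmc'
      else pvAOuter file_lines stage_idx job_idx rest (i + 1) (smc + 1) jmc
    else pvAOuter file_lines stage_idx job_idx rest (i + 1) smc jmc

def find_stage_job_line_py (file_lines : List String) (stage_idx : Int) (job_idx : Int) : Int :=
  pvAOuter file_lines stage_idx job_idx file_lines 0 (-1) (-1)

-- ===== PORT B =====
def pvBStageLines (file_lines : List String) : List Int :=
  ((PySem.List.enumerate file_lines 0).filter (fun p => PySem.Str.isIn "stage:" p.2)).map (fun p => p.1)

def pvBJobs (file_lines : List String) (start : Int) : List Int :=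
  (PySem.List.pyRange start (file_lines.length : Int) 1).filter
    (fun j => PySem.Str.isIn "job:" (PySem.List.pyGetD file_lines j ""))

def find_stage_job_line_py_alt (file_lines : List String) (stage_idx : Int) (job_idx : Int) : Int :=
  let stage_lines := pvBStageLines file_lines
  if 0 ≤ stage_idx ∧ stage_idx < (stage_lines.length : Int) ∧ 0 ≤ job_idx then
    let start := PySem.List.pyGetD stage_lines stage_idx 0
    let jobs := pvBJobs file_lines start
    if job_idx < (jobs.length : Int) then PySem.List.pyGetD jobs job_idx (-1) else -1
  else -1

-- ===== PRECONDITION & SPEC =====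
def Spec_find_stage_job_line_py (file_lines : List String) (stage_idx : Int) (job_idx : Int) (out : Int) : Prop := out = find_stage_job_line_py_alt file_lines stage_idx job_idx
instance (file_lines : List String) (stage_idx : Int) (job_idx : Int) (out : Int) : Decidable (Spec_find_stage_job_line_py file_lines stage_idx job_idx out) := by unfold Spec_find_stage_job_line_py; infer_instance

-- ===== CLAIM (what is proved, stated in full; the proofs are below) =====
def Claim_equal_find_stage_job_line_py : Prop := ∀ (file_lines : List String) (stage_idx : Int) (job_idx : Int), Dom_find_stage_job_line_py file_lines stage_idx job_idx → Spec_find_stage_job_line_py file_lines stage_idx job_idx (find_stage_job_line_py file_lines stage_idx job_idx)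

-- ===== LEMMAS AND PROOFS =====

-- "- job:" ⊆ line implies "job:" ⊆ line, so A's second disjunct is redundant
lemma pvJobHit_eq (l : String) : pvJobHit l = PySem.Str.isIn "job:" l := by
  unfold pvJobHit
  cases h : PySem.Str.isIn "job:" l with
  | true => simp
  | false =>
    simp only [Bool.false_or]
    cases h3 : PySem.Str.isIn "- job:" l with
    | false => rfl
    | true =>
      have h4 : PySem.Str.isIn "job:" l = true := (PySem.Str.isIn_iff_infix _ _).mpr
        (List.IsInfix.trans (by decide) ((PySem.Str.isIn_iff_infix _ _).mp h3))
      simp_all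

lemma pvStageHit_eq (l : String) : pvStageHit l = PySem.Str.isIn "stage:" l := by
  unfold pvStageHit
  cases h : PySem.Str.isIn "stage:" l with
  | true => simp
  | false =>
    simp only [Bool.false_or]
    cases h3 : PySem.Str.isIn "- stage:" l with
    | false => rfl
    | true =>
      have h4 : PySem.Str.isIn "stage:" l = true := (PySem.Str.isIn_iff_infix _ _).mpr
        (List.IsInfix.trans (by decide) ((PySem.Str.isIn_iff_infix _ _).mp h3))
      simp_all

-- proof helper: indexing with an Int, none when negative or out of range
def pvPick (l : List Int) (k : Int) : Option Int :=
  if 0 ≤ k then l[k.toNat]? else none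

lemma pvPick_nil (k : Int) : pvPick [] k = none := by
  unfold pvPick; split <;> simp

lemma pvPick_cons (a : Int) (l : List Int) (k : Int) :
    pvPick (a :: l) k = if k = 0 then some a else pvPick l (k - 1) := by
  unfold pvPick
  split_ifs with h1 h2 h3 <;> try omega
  · subst h2; simp
  · have hk : k.toNat = (k - 1).toNat + 1 := by omega
    rw [hk, List.getElem?_cons_succ]
  · rfl

lemma pvPick_getD (l : List Int) (k : Int) (d : Int) (h0 : 0 ≤ k) (hlen : k < (l.length : Int)) :
    pvPick l k = some (PySem.List.pyGetD l k d) := by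
  have hk : (k.toNat : Int) = k := by omega
  have hlt : k.toNat < l.length := by omega
  rw [← hk, PySem.List.pyGetD_natCast]
  unfold pvPick
  simp [List.getElem?_eq_getElem hlt, hk, h0]

lemma pvPick_none_of_out (l : List Int) (k : Int) (h : ¬ (0 ≤ k ∧ k < (l.length : Int))) :
    pvPick l k = none := by
  unfold pvPick
  split_ifs with h0
  · have : l.length ≤ k.toNat := by omega
    simp [List.getElem?_eq_none this]
  · rfl

-- line numbers of the stage-marker lines of `rest`, starting at index i
def pvStageIdxFrom (i : Int) : List String → List Int
  | [] => []
  | l :: rest =>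
    if pvStageHit l then i :: pvStageIdxFrom (i + 1) rest else pvStageIdxFrom (i + 1) rest

lemma pvBStageLines_eq_aux (fl : List String) :
    ∀ s : Int, ((PySem.List.enumerate fl s).filter (fun p => PySem.Str.isIn "stage:" p.2)).map
      (fun p => p.1) = pvStageIdxFrom s fl := by
  induction fl with
  | nil => intro s; simp [pvStageIdxFrom, PySem.List.enumerate_nil]
  | cons l rest ih =>
    intro s
    rw [PySem.List.enumerate_cons, List.filter_cons]
    simp only [pvStageIdxFrom, pvStageHit_eq]
    cases h : PySem.Str.isIn "stage:" l with
    | true =>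
      simp [h]
      simpa using ih (s + 1)
    | false =>
      simp [h]
      simpa using ih (s + 1)

def pvInnerHits (fl : List String) (start : Int) : List Int :=
  (PySem.List.pyRange start (fl.length : Int) 1).filter
    (fun j => pvJobHit (PySem.List.pyGetD fl j ""))

lemma pvBJobs_eq (fl : List String) (start : Int) : pvBJobs fl start = pvInnerHits fl start := by
  unfold pvBJobs pvInnerHits
  congr 1
  funext j
  rw [pvJobHit_eq]

lemma pvAInner_eq (fl : List String) (job_idx : Int) :
    ∀ (ixs : List Int) (jmc : Int),
      pvAInner fl job_idx ixs jmc =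
        match pvPick (ixs.filter (fun j => pvJobHit (PySem.List.pyGetD fl j ""))) (job_idx - jmc - 1) with
        | some j => (some j, job_idx)
        | none => (none, jmc + (ixs.filter (fun j => pvJobHit (PySem.List.pyGetD fl j ""))).length) := by
  intro ixs
  induction ixs with
  | nil =>
    intro jmc
    rw [List.filter_nil, pvPick_nil]
    simp [pvAInner]
  | cons j rest ih =>
    intro jmc
    rw [pvAInner, List.filter_cons]
    cases h : pvJobHit (PySem.List.pyGetD fl j "") with
    | false => simpa [h] using ih jmc
    | true =>
      simp only [h, if_true]
      by_cases he : jmc + 1 = job_idx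
      · have hz : job_idx - jmc - 1 = 0 := by omega
        rw [if_pos he, pvPick_cons, if_pos hz]
        subst he
        simp
      · have hz : job_idx - jmc - 1 ≠ 0 := by omega
        rw [ih (jmc + 1)]
        have harg : job_idx - (jmc + 1) - 1 = (job_idx - jmc - 1) - 1 := by omega
        simp only [if_neg he, pvPick_cons, if_neg hz, harg]
        cases hp : pvPick (rest.filter (fun j => pvJobHit (PySem.List.pyGetD fl j "")))
            (job_idx - jmc - 1 - 1) <;> simp <;> omega

lemma pvAOuter_done (fl : List String) (stage_idx job_idx : Int) :
    ∀ (rest : List String) (i smc jmc : Int), stage_idx ≤ smc →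
      pvAOuter fl stage_idx job_idx rest i smc jmc = -1 := by
  intro rest
  induction rest with
  | nil => intro i smc jmc _; rfl
  | cons line rest ih =>
    intro i smc jmc h
    rw [pvAOuter]
    cases hs : pvStageHit line with
    | false => simpa [hs] using ih (i + 1) smc jmc h
    | true =>
      have hne : ¬ (smc + 1 = stage_idx) := by omega
      simp only [if_true, if_neg hne]
      exact ih (i + 1) (smc + 1) jmc (by omega)

lemma pvAOuter_eq (fl : List String) (stage_idx job_idx : Int) :
    ∀ (rest : List String) (i smc : Int), smc < stage_idx →
      pvAOuter fl stage_idx job_idx rest i smc (-1) =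
        match pvPick (pvStageIdxFrom i rest) (stage_idx - smc - 1) with
        | some start => (pvPick (pvInnerHits fl start) job_idx).getD (-1)
        | none => -1 := by
  intro rest
  induction rest with
  | nil =>
    intro i smc _
    simp [pvAOuter, pvStageIdxFrom, pvPick_nil]
  | cons line rest ih =>
    intro i smc hlt
    rw [pvAOuter]
    simp only [pvStageIdxFrom]
    cases hs : pvStageHit line with
    | false => simpa using ih (i + 1) smc hlt
    | true =>
      simp only [if_true]
      by_cases he : smc + 1 = stage_idx
      · have hz : stage_idx - smc - 1 = 0 := by omega
        rw [pvAInner_eq]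
        have harg : job_idx - (-1) - 1 = job_idx := by omega
        have hhits : (PySem.List.pyRange i (fl.length : Int) 1).filter
            (fun j => pvJobHit (PySem.List.pyGetD fl j "")) = pvInnerHits fl i := rfl
        simp only [hz, pvPick_cons, harg, hhits, reduceIte, if_pos he]
        cases hp : pvPick (pvInnerHits fl i) job_idx with
        | some j => simp [hp]
        | none =>
          simp only [hp]
          simpa using pvAOuter_done fl stage_idx job_idx rest (i + 1) (smc + 1) _ (by omega)
      · have hz : stage_idx - smc - 1 ≠ 0 := by omega
        have harg : stage_idx - (smc + 1) - 1 = (stage_idx - smc - 1) - 1 := by omega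
        rw [if_neg he, ih (i + 1) (smc + 1) (by omega), pvPick_cons, if_neg hz, harg]

-- ===== VERDICT (by name: the statement is the Claim_ definition above) =====
theorem find_stage_job_line_py_spec : Claim_equal_find_stage_job_line_py := by
  intro fl stage_idx job_idx _
  unfold Spec_find_stage_job_line_py find_stage_job_line_py find_stage_job_line_py_alt
  have hsl : pvBStageLines fl = pvStageIdxFrom 0 fl := pvBStageLines_eq_aux fl 0
  by_cases hneg : stage_idx < 0
  · rw [pvAOuter_done fl stage_idx job_idx fl 0 (-1) (-1) (by omega)]
    have : ¬ (0 ≤ stage_idx ∧ stage_idx < ((pvBStageLines fl).length : Int) ∧ 0 ≤ job_idx) := by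
      intro h; omega
    simp [this]
  · rw [pvAOuter_eq fl stage_idx job_idx fl 0 (-1) (by omega)]
    have harg : stage_idx - (-1) - 1 = stage_idx := by omega
    rw [harg, ← hsl]
    by_cases hin : stage_idx < ((pvBStageLines fl).length : Int)
    · rw [pvPick_getD _ _ 0 (by omega) hin]
      by_cases hj : 0 ≤ job_idx
      · rw [if_pos ⟨by omega, hin, hj⟩]
        simp only [pvBJobs_eq]
        by_cases hjl : job_idx <
            ((pvInnerHits fl (PySem.List.pyGetD (pvBStageLines fl) stage_idx 0)).length : Int)
        · rw [pvPick_getD _ _ (-1) hj hjl]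
          simp [hjl]
        · rw [pvPick_none_of_out _ _ (by omega)]
          simp [hjl]
      · have hng : ¬ (0 ≤ stage_idx ∧ stage_idx < ((pvBStageLines fl).length : Int) ∧ 0 ≤ job_idx) := by
          intro h; omega
        rw [if_neg hng]
        have hpn : pvPick (pvInnerHits fl (PySem.List.pyGetD (pvBStageLines fl) stage_idx 0))
            job_idx = none := pvPick_none_of_out _ _ (by omega)
        simp [hpn]
    · rw [pvPick_none_of_out _ _ (by omega)]
      have : ¬ (0 ≤ stage_idx ∧ stage_idx < ((pvBStageLines fl).length : Int) ∧ 0 ≤ job_idx) := by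
        intro h; omega
      simp [this]
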